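-- pv_equiv track=rewrite | github.com/yskang/AlgorithmPractice | baekjoon/python/pascal_triangle_b.py | solution
-- ===== SOURCE A (Python) =====
-- def solution(n: int, k: int):
--     row = [1]
--     row_2 = []
--     while n > 1:
--         row.append(0)
--         prev = 0
--         for r in row:
--             row_2.append(prev+r)
--             prev = r
--         row = row_2[:]
--         row_2 = []
--         n-=1
--     return row[k-1]
-- ===== SOURCE B (Python) =====
-- def solution(n, k):
--     # One pass: row[i] = C(n-1, i) by the multiplicative recurrence.
--     row = [1]
--     for i in range(1, n):
--         row.append(row[-1] * (n - i) // i)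
--     return row[k - 1]
-- ===== Notes on version B (the rewrite author's own statement) =====
-- stated objective: faster
-- what changed: B builds the requested Pascal row directly in one pass with the multiplicative recurrence C(n-1,i) = C(n-1,i-1)*(n-i)//i, instead of constructing every previous row by pairwise addition; Pre_ excludes only the inputs where both programs raise IndexError.
import Mathlib
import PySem

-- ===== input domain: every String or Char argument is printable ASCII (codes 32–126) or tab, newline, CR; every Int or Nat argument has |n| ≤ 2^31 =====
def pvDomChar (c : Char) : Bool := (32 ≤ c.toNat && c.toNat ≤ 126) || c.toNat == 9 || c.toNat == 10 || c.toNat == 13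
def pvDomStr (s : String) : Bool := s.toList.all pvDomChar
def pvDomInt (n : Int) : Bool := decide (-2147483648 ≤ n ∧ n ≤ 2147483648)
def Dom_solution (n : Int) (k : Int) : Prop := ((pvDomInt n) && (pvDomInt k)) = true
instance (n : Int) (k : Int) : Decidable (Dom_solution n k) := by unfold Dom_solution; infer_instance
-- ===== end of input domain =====

-- B builds the requested Pascal row in one pass with the multiplicative recurrence
-- instead of A's row-by-row pairwise addition; intended as faster.


-- ===== PORT A =====
-- the inner 'for r in row' loop threading 'prev'
def pvStep : Int → List Int → List Int
  | _, [] => []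
  | prev, r :: rs => (prev + r) :: pvStep r rs

-- the 'while n > 1' loop (runs (n-1).toNat times)
def pvLoop : Nat → List Int → List Int
  | 0, row => row
  | t + 1, row => pvLoop t (pvStep 0 (row ++ [0]))

def solution (n : Int) (k : Int) : Int :=
  PySem.List.pyGetD (pvLoop (n - 1).toNat [1]) (k - 1) 0

-- ===== PORT B =====
def solution_alt (n : Int) (k : Int) : Int :=
  let row := (PySem.List.pyRange 1 n 1).foldl
    (fun row i => row ++ [PySem.Int.floordiv (PySem.List.pyGetD row (-1) 0 * (n - i)) i]) [1]
  PySem.List.pyGetD row (k - 1) 0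

-- ===== PRECONDITION & SPEC =====
-- Both programs raise IndexError iff k-1 is out of Python's (negative-index-aware) range for
-- the row of length max(n,1); Pre_ excludes exactly those inputs.
def Pre_solution (n : Int) (k : Int) : Prop := 1 - max n 1 ≤ k ∧ k ≤ max n 1
instance (n : Int) (k : Int) : Decidable (Pre_solution n k) := by unfold Pre_solution; infer_instance
def pvWitness_solution : Int × Int := (5, 3)

def Spec_solution (n : Int) (k : Int) (out : Int) : Prop := out = solution_alt n k
instance (n : Int) (k : Int) (out : Int) : Decidable (Spec_solution n k out) := by unfold Spec_solution; infer_instance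

-- ===== CLAIM (what is proved, stated in full; the proofs are below) =====
def Claim_equal_solution : Prop := ∀ (n : Int) (k : Int), Dom_solution n k → Pre_solution n k → Spec_solution n k (solution n k)

-- ===== LEMMAS AND PROOFS =====

-- The Pascal row with index t, as Ints.
def pascal (t : Nat) : List Int := (List.range (t + 1)).map (fun i => (t.choose i : Int))

theorem pascal_length (t : Nat) : (pascal t).length = t + 1 := by
  simp [pascal]

theorem pvStep_eq_zipWith (p : Int) (xs : List Int) :
    pvStep p xs = List.zipWith (· + ·) (p :: xs) xs := by
  induction xs generalizing p with
  | nil => rfl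
  | cons r rs ih => simp [pvStep, ih]

theorem pascal_append_getElem (t i : Nat) (h : i < t + 2) :
    (pascal t ++ [0])[i]'(by simp [pascal_length]; omega) = (t.choose i : Int) := by
  by_cases hi : i < t + 1
  · rw [List.getElem_append_left (by rw [pascal_length]; omega)]
    simp only [pascal, List.getElem_map, List.getElem_range]
  · have : i = t + 1 := by omega
    subst this
    rw [List.getElem_append_right (by simp [pascal_length])]
    simp [pascal_length, Nat.choose_succ_self]

theorem pvStep_pascal (t : Nat) :
    pvStep 0 (pascal t ++ [0]) = pascal (t + 1) := by
  rw [pvStep_eq_zipWith]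
  apply List.ext_getElem
  · simp [pascal]
  · intro i h1 h2
    have hi : i < t + 2 := by rw [pascal_length] at h2; exact h2
    rw [List.getElem_zipWith]
    match i, hi with
    | 0, _ =>
      simp only [List.getElem_cons_zero]
      rw [pascal_append_getElem t 0 (by omega)]
      simp [pascal]
    | i + 1, hi =>
      simp only [List.getElem_cons_succ]
      rw [pascal_append_getElem t i (by omega), pascal_append_getElem t (i+1) (by omega)]
      have : (pascal (t+1))[i+1]'(by simp [pascal_length]; omega) = ((t+1).choose (i+1) : Int) := by
        simp [pascal]
      rw [this, Nat.choose_succ_succ']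
      push_cast
      ring

theorem pvLoop_pascal (t s : Nat) : pvLoop t (pascal s) = pascal (s + t) := by
  induction t generalizing s with
  | zero => rfl
  | succ t ih =>
    show pvLoop t (pvStep 0 (pascal s ++ [0])) = _
    rw [pvStep_pascal, ih]
    congr 1
    omega

theorem pascal_zero : pascal 0 = [1] := by decide

theorem pvLoop_one (t : Nat) : pvLoop t [1] = pascal t := by
  rw [← pascal_zero, pvLoop_pascal]
  simp

-- the row prefix [C(m,0), …, C(m,i)]
def rowPrefix (m i : Nat) : List Int := (List.range (i + 1)).map (fun j => (m.choose j : Int))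

theorem rowPrefix_last (m i : Nat) :
    PySem.List.pyGetD (rowPrefix m i) (-1) 0 = (m.choose i : Int) := by
  have h1 : (-1 : Int) = -((1 : Nat) : Int) := by norm_num
  rw [h1, PySem.List.pyGetD_neg_natCast _ 1 0 (by omega) (by simp [rowPrefix])]
  simp [rowPrefix]

-- B's fold builds the row prefix: after processing 1..i, row = [C(m,0), …, C(m,i)]
theorem fold_row (m i : Nat) (hi : i ≤ m) :
    ((List.range i).map (fun x : Nat => (1 : Int) + x)).foldl
      (fun row x => row ++
        [PySem.Int.floordiv (PySem.List.pyGetD row (-1) 0 * (((m : Int) + 1) - x)) x]) [1]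
    = rowPrefix m i := by
  induction i with
  | zero => simp [rowPrefix, List.range_succ]
  | succ i ih =>
    rw [List.range_succ, List.map_append, List.foldl_append, ih (by omega)]
    simp only [List.map_cons, List.map_nil, List.foldl_cons, List.foldl_nil]
    rw [rowPrefix_last]
    have h1 : (m : Int) + 1 - ((1 : Int) + i) = ((m - i : Nat) : Int) := by omega
    have h2 : (1 : Int) + (i : Nat) = ((i + 1 : Nat) : Int) := by push_cast; ring
    rw [h1, h2, ← Nat.cast_mul, PySem.Int.floordiv_natCast]
    have h3 : m.choose i * (m - i) = m.choose (i + 1) * (i + 1) :=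
      (Nat.choose_succ_right_eq m i).symm
    rw [h3, Nat.mul_div_cancel _ (by omega)]
    simp [rowPrefix, List.range_succ]

theorem alt_eq (n k : Int) :
    solution_alt n k = PySem.List.pyGetD (pascal (n - 1).toNat) (k - 1) 0 := by
  unfold solution_alt
  rw [PySem.List.pyRange_one]
  by_cases h : n ≤ 1
  · have : (n - 1).toNat = 0 := by omega
    simp [this, pascal, List.range_succ]
  · set T : Nat := (n - 1).toNat with hT
    have hn : n = (T : Int) + 1 := by omega
    rw [hn]
    show PySem.List.pyGetD (((List.range T).map (fun x : Nat => (1 : Int) + x)).foldl _ [1]) (k - 1) 0 = _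
    rw [fold_row T T le_rfl]
    rfl

-- ===== VERDICT (by name: the statement is the Claim_ definition above) =====
theorem solution_spec : Claim_equal_solution := by
  intro n k _ _
  unfold Spec_solution
  rw [alt_eq]
  unfold solution
  rw [pvLoop_one]
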